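-- pv_equiv track=rewrite | github.com/R0LDI/AyED1-2024-TPs | tp03/Ejercicio5.py | butacas_contiguas
-- ===== SOURCE A (Python) =====
-- from typing import List, Tuple
--
-- def butacas_contiguas(sala: List[List[str]]) -> Tuple[int, int]:
--
--     max_contiguas = 0
--     coordenadas_inicio = (0, 0)
--     for i, fila in enumerate(sala):
--         contiguas = 0
--         for j, butaca in enumerate(fila):
--             if butaca == 'L':
--                 contiguas += 1
--                 if contiguas > max_contiguas:
--                     max_contiguas = contiguas
--                     coordenadas_inicio = (i+1, j+1-contiguas+1)
--             else:
--                 contiguas = 0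
--     return coordenadas_inicio
-- ===== SOURCE B (Python) =====
-- from typing import List, Tuple
--
-- def butacas_contiguas(sala: List[List[str]]) -> Tuple[int, int]:
--     # Run-jump scanner: split each row into maximal runs with two indices
--     # and compare each whole 'L' run once, instead of a per-seat counter.
--     best = 0
--     coordenadas = (0, 0)
--     for i, fila in enumerate(sala):
--         n = len(fila)
--         j = 0
--         while j < n:
--             k = j
--             while k < n and fila[k] == fila[j]:
--                 k += 1
--             if fila[j] == 'L' and k - j > best:
--                 best = k - j
--                 coordenadas = (i + 1, j + 1)
--             j = k
--     return coordenadas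
-- ===== Notes on version B (the rewrite author's own statement) =====
-- stated objective: alternative
-- what changed: A counts seats one by one with a running 'contiguas' counter and updates the best on every increment; B scans each row run by run with a two-pointer jump (inner while finds the end of the current maximal run), comparing each whole 'L' run once against the best.
import Mathlib
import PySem

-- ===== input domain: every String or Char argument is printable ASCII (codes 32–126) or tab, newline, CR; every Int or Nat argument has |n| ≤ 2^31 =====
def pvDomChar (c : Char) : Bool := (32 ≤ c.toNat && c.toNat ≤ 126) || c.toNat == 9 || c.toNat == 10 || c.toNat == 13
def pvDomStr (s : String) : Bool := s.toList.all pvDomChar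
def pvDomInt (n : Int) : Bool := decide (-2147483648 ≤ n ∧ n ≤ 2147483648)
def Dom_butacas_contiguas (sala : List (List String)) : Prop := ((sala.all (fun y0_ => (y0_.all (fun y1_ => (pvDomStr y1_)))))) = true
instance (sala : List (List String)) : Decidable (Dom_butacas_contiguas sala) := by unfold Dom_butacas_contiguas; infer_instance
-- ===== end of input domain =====

-- B replaces A's per-seat counter state machine by a run-jump scanner (two indices walk
-- each row one maximal run at a time, comparing a whole 'L' run once); objective: alternative.

-- ===== PORT A =====
-- inner for-loop of A: state (contiguas, max_contiguas, coordenadas_inicio), j the column index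
def aRow (i : Int) : List String → Int → Int → Int → Int × Int → Int × (Int × Int)
  | [], _j, _contig, best, coord => (best, coord)
  | b :: more, j, contig, best, coord =>
    if b = "L" then
      if contig + 1 > best then
        aRow i more (j+1) (contig+1) (contig+1) (i+1, j+1-(contig+1)+1)
      else
        aRow i more (j+1) (contig+1) best coord
    else aRow i more (j+1) 0 best coord

-- outer for-loop of A over the rows, i the row index
def aRows : List (List String) → Int → Int → Int × Int → Int × Int
  | [], _i, _best, coord => coord
  | fila :: more, i, best, coord =>
    let r := aRow i fila 0 0 best coord
    aRows more (i+1) r.1 r.2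

def butacas_contiguas (sala : List (List String)) : Int × Int := aRows sala 0 0 (0, 0)

-- ===== PORT B =====
-- inner while-loop of B: j jumps run by run; takeWhile/dropWhile realise the inner scan 'k'
def bRow (i : Int) : List String → Int → Int → Int × Int → Int × (Int × Int)
  | [], _j, best, coord => (best, coord)
  | x :: ys, j, best, coord =>
    if x = "L" ∧ 1 + ((ys.takeWhile (fun y => y == x)).length : Int) > best then
      bRow i (ys.dropWhile (fun y => y == x))
        (j + (1 + ((ys.takeWhile (fun y => y == x)).length : Int)))
        (1 + ((ys.takeWhile (fun y => y == x)).length : Int)) (i+1, j+1)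
    else
      bRow i (ys.dropWhile (fun y => y == x))
        (j + (1 + ((ys.takeWhile (fun y => y == x)).length : Int))) best coord
  termination_by l => l.length
  decreasing_by
    all_goals
      simp only [List.length_cons]
      exact Nat.lt_succ_of_le (List.length_dropWhile_le _ _)

def bRows : List (List String) → Int → Int → Int × Int → Int × Int
  | [], _i, _best, coord => coord
  | fila :: more, i, best, coord =>
    let r := bRow i fila 0 best coord
    bRows more (i+1) r.1 r.2

def butacas_contiguas_alt (sala : List (List String)) : Int × Int := bRows sala 0 0 (0, 0)

-- ===== PRECONDITION & SPEC =====
def Spec_butacas_contiguas (sala : List (List String)) (out : Int × Int) : Prop := out = butacas_contiguas_alt sala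
instance (sala : List (List String)) (out : Int × Int) : Decidable (Spec_butacas_contiguas sala out) := by unfold Spec_butacas_contiguas; infer_instance

-- ===== CLAIM (what is proved, stated in full; the proofs are below) =====
def Claim_equal_butacas_contiguas : Prop := ∀ (sala : List (List String)), Dom_butacas_contiguas sala → Spec_butacas_contiguas sala (butacas_contiguas sala)

-- ===== LEMMAS AND PROOFS =====

theorem bRow_nil (i j best : Int) (coord : Int × Int) :
    bRow i [] j best coord = (best, coord) := by
  rw [bRow]

theorem bRow_cons (i : Int) (x : String) (ys : List String) (j best : Int) (coord : Int × Int) :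
    bRow i (x :: ys) j best coord =
      if x = "L" ∧ 1 + ((ys.takeWhile (fun y => y == x)).length : Int) > best then
        bRow i (ys.dropWhile (fun y => y == x))
          (j + (1 + ((ys.takeWhile (fun y => y == x)).length : Int)))
          (1 + ((ys.takeWhile (fun y => y == x)).length : Int)) (i+1, j+1)
      else
        bRow i (ys.dropWhile (fun y => y == x))
          (j + (1 + ((ys.takeWhile (fun y => y == x)).length : Int))) best coord := by
  rw [bRow]

-- A's max_contiguas never decreases
theorem aRow_best_mono (i : Int) : ∀ (l : List String) (j c best : Int) (coord : Int × Int),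
    best ≤ (aRow i l j c best coord).1 := by
  intro l
  induction l with
  | nil => intro j c best coord; simp [aRow]
  | cons b t ih =>
    intro j c best coord
    by_cases hb : b = "L"
    · by_cases hc : c + 1 > best
      · rw [aRow, if_pos hb, if_pos hc]
        exact le_trans (by omega) (ih _ _ _ _)
      · rw [aRow, if_pos hb, if_neg hc]
        exact ih _ _ _ _
    · rw [aRow, if_neg hb]
      exact ih _ _ _ _

theorem aRow_congr (i : Int) (l : List String) {j j' c c' b b' : Int} {p p' : Int × Int}
    (h1 : j = j') (h2 : c = c') (h3 : b = b') (h4 : p = p') :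
    aRow i l j c b p = aRow i l j' c' b' p' := by
  subst h1; subst h2; subst h3; subst h4; rfl

theorem bRow_congr (i : Int) (l : List String) {j j' b b' : Int} {p p' : Int × Int}
    (h1 : j = j') (h3 : b = b') (h4 : p = p') :
    bRow i l j b p = bRow i l j' b' p' := by
  subst h1; subst h3; subst h4; rfl

-- contiguas is irrelevant when the next seat (if any) is not 'L'
theorem aRow_contig_irrel (i : Int) (d : List String) (j c c' best : Int) (coord : Int × Int)
    (h : ∀ y, d.head? = some y → y ≠ "L") :
    aRow i d j c best coord = aRow i d j c' best coord := by
  cases d with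
  | nil => rfl
  | cons y t =>
    have hy : ¬ y = "L" := h y rfl
    simp [aRow, hy]

-- running aRow through a block of k seats 'L'
theorem aRow_runL (i : Int) (k : Nat) : ∀ (rest : List String) (j c best : Int) (coord : Int × Int),
    c ≤ best →
    aRow i (List.replicate k "L" ++ rest) j c best coord =
      aRow i rest (j + k) (c + k)
        (if c + (k : Int) > best then c + k else best)
        (if c + (k : Int) > best then (i+1, j + k - (c + k) + 1) else coord) := by
  induction k with
  | zero =>
    intro rest j c best coord hc
    have h : ¬ (c + ((0:Nat) : Int) > best) := by push_cast; omega
    rw [if_neg h, if_neg h]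
    simp
  | succ k ih =>
    intro rest j c best coord hc
    have hrepl : List.replicate (k+1) "L" ++ rest = "L" :: (List.replicate k "L" ++ rest) := by
      simp [List.replicate_succ]
    rw [hrepl]
    by_cases hcb : c + 1 > best
    · rw [show aRow i ("L" :: (List.replicate k "L" ++ rest)) j c best coord =
            aRow i (List.replicate k "L" ++ rest) (j+1) (c+1) (c+1) (i+1, j+1-(c+1)+1) by
          simp [aRow, hcb]]
      rw [ih _ _ _ _ _ (le_refl (c+1))]
      have h2 : c + (((k:Nat)+1 : Nat) : Int) > best := by push_cast; omega
      rw [if_pos h2, if_pos h2]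
      by_cases hk : (k : Int) > 0
      · have h1 : c + 1 + (k:Int) > c + 1 := by omega
        rw [if_pos h1, if_pos h1]
        exact aRow_congr i rest (by push_cast; ring) (by push_cast; ring)
          (by push_cast; ring)
          (by rw [Prod.mk.injEq]; exact ⟨rfl, by push_cast; ring⟩)
      · have hk0 : (k : Int) = 0 := by omega
        have h1 : ¬ (c + 1 + (k:Int) > c + 1) := by omega
        rw [if_neg h1, if_neg h1]
        exact aRow_congr i rest (by push_cast; omega) (by push_cast; omega)
          (by push_cast; omega)
          (by rw [Prod.mk.injEq]; exact ⟨rfl, by push_cast; omega⟩)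
    · rw [show aRow i ("L" :: (List.replicate k "L" ++ rest)) j c best coord =
            aRow i (List.replicate k "L" ++ rest) (j+1) (c+1) best coord by
          simp [aRow, hcb]]
      rw [ih _ _ _ _ _ (by omega)]
      have e : ∀ p p' : Int × Int, p = p' → True := fun _ _ _ => trivial
      have h2 : (c + 1 + (k:Int) > best) ↔ (c + (((k:Nat)+1 : Nat) : Int) > best) := by
        push_cast; omega
      by_cases hcc : c + 1 + (k:Int) > best
      · rw [if_pos hcc, if_pos (h2.mp hcc), if_pos hcc, if_pos (h2.mp hcc)]
        exact aRow_congr i rest (by push_cast; ring) (by push_cast; ring)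
          (by push_cast; ring)
          (by rw [Prod.mk.injEq]; exact ⟨rfl, by push_cast; ring⟩)
      · rw [if_neg hcc, if_neg (fun h => hcc (h2.mpr h)), if_neg hcc,
            if_neg (fun h => hcc (h2.mpr h))]
        exact aRow_congr i rest (by push_cast; ring) (by push_cast; ring) rfl rfl

-- running aRow through a nonempty block of k+1 seats ≠ 'L'
theorem aRow_runNotL (i : Int) (x : String) (hx : ¬ x = "L") (k : Nat) :
    ∀ (rest : List String) (j c best : Int) (coord : Int × Int),
    aRow i (List.replicate (k+1) x ++ rest) j c best coord =
      aRow i rest (j + ((k+1 : Nat) : Int)) 0 best coord := by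
  induction k with
  | zero =>
    intro rest j c best coord
    simp [aRow, hx]
  | succ k ih =>
    intro rest j c best coord
    have hrepl : List.replicate (k+1+1) x ++ rest = x :: (List.replicate (k+1) x ++ rest) := by
      simp [List.replicate_succ]
    rw [hrepl]
    rw [show aRow i (x :: (List.replicate (k+1) x ++ rest)) j c best coord =
          aRow i (List.replicate (k+1) x ++ rest) (j+1) 0 best coord by simp [aRow, hx]]
    rw [ih]
    exact aRow_congr i rest (by push_cast; ring) rfl rfl rfl

theorem takeWhile_eq_replicate (x : String) (ys : List String) :
    ys.takeWhile (fun y => y == x) =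
      List.replicate (ys.takeWhile (fun y => y == x)).length x := by
  induction ys with
  | nil => rfl
  | cons y t ih =>
    by_cases h : y = x
    · subst h
      simp only [List.takeWhile_cons, BEq.rfl, if_true]
      simp [List.replicate_succ, ← ih]
    · simp [h]

theorem head_dropWhile_ne (x : String) (ys : List String) :
    ∀ y, (ys.dropWhile (fun y => y == x)).head? = some y → y ≠ x := by
  induction ys with
  | nil => intro y h; simp at h
  | cons z t ih =>
    intro y h
    by_cases hz : z = x
    · exact ih y (by simpa [List.dropWhile_cons, hz] using h)
    · rw [List.dropWhile_cons, if_neg (by simpa using hz)] at h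
      simp only [List.head?_cons, Option.some.injEq] at h
      exact h ▸ hz

-- main row lemma: A's per-seat loop equals B's run-jump loop
theorem row_eq (n : Nat) : ∀ (fila : List String), fila.length ≤ n →
    ∀ (i j best : Int) (coord : Int × Int), 0 ≤ best →
    aRow i fila j 0 best coord = bRow i fila j best coord := by
  induction n with
  | zero =>
    intro fila hlen i j best coord _
    cases fila with
    | nil => rw [aRow, bRow_nil]
    | cons _ _ => simp at hlen
  | succ n ih =>
    intro fila hlen i j best coord hbest
    cases fila with
    | nil => rw [aRow, bRow_nil]
    | cons x ys =>
      have h1 : ys = ys.takeWhile (fun y => y == x) ++ ys.dropWhile (fun y => y == x) :=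
        (List.takeWhile_append_dropWhile).symm
      have hsplit : x :: ys =
          List.replicate ((ys.takeWhile (fun y => y == x)).length + 1) x ++
            ys.dropWhile (fun y => y == x) := by
        calc x :: ys
            = x :: (ys.takeWhile (fun y => y == x) ++ ys.dropWhile (fun y => y == x)) := by
              rw [← h1]
          _ = _ := by
              rw [List.replicate_succ, List.cons_append, ← takeWhile_eq_replicate]
      have hdlen : (ys.dropWhile (fun y => y == x)).length ≤ n := by
        have h2 : (ys.dropWhile (fun y => y == x)).length ≤ ys.length :=
          List.length_dropWhile_le _ _
        simp only [List.length_cons] at hlen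
        omega
      by_cases hx : x = "L"
      · subst hx
        conv_lhs => rw [hsplit]
        rw [aRow_runL i ((ys.takeWhile (fun y => y == "L")).length + 1) _ j 0 best coord
              hbest]
        rw [aRow_contig_irrel i _ _ _ 0 _ _ (head_dropWhile_ne "L" ys)]
        rw [bRow_cons]
        by_cases hb : 1 + ((ys.takeWhile (fun y => y == "L")).length : Int) > best
        · have hb' : (0 : Int) + (((ys.takeWhile (fun y => y == "L")).length + 1 : Nat) : Int) > best := by
            push_cast; omega
          rw [if_pos hb', if_pos hb', if_pos ⟨rfl, hb⟩]
          rw [ih _ hdlen _ _ _ _ (by push_cast; omega)]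
          exact bRow_congr i _ (by push_cast; ring) (by push_cast; ring)
            (by rw [Prod.mk.injEq]; exact ⟨rfl, by push_cast; ring⟩)
        · have hb' : ¬ ((0 : Int) + (((ys.takeWhile (fun y => y == "L")).length + 1 : Nat) : Int) > best) := by
            push_cast; omega
          rw [if_neg hb', if_neg hb', if_neg (fun h => hb h.2)]
          rw [ih _ hdlen _ _ _ _ hbest]
          exact bRow_congr i _ (by push_cast; ring) rfl rfl
      · conv_lhs => rw [hsplit]
        rw [aRow_runNotL i x hx _ _ j 0 best coord, ih _ hdlen _ _ _ _ hbest]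
        rw [bRow_cons, if_neg (fun h => hx h.1)]
        exact bRow_congr i _ (by push_cast; ring) rfl rfl

theorem rows_eq : ∀ (sala : List (List String)) (i best : Int) (coord : Int × Int), 0 ≤ best →
    aRows sala i best coord = bRows sala i best coord := by
  intro sala
  induction sala with
  | nil => intro i best coord _; rfl
  | cons fila more ih =>
    intro i best coord hbest
    simp only [aRows, bRows]
    have hmono : (0 : Int) ≤ (aRow i fila 0 0 best coord).1 :=
      le_trans hbest (aRow_best_mono i fila 0 0 best coord)
    rw [row_eq fila.length fila (le_refl _) i 0 best coord hbest] at hmono ⊢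
    exact ih _ _ _ hmono

-- ===== VERDICT (by name: the statement is the Claim_ definition above) =====
theorem butacas_contiguas_spec : Claim_equal_butacas_contiguas := by
  intro sala _
  unfold Spec_butacas_contiguas butacas_contiguas butacas_contiguas_alt
  exact rows_eq sala 0 0 (0, 0) (le_refl 0)
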